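-- pv_equiv track=rewrite | github.com/ipaljak-tbtl/advent-of-code | 2023/paljak/13/small.py | solve_dim
-- ===== SOURCE A (Python) =====
-- def solve_dim(l):
--     ret = 0
--     for i in range(len(l) - 1):
--         ok = True
--         for k in range(i + 1):
--             if not ok or i + k + 1 == len(l):
--                 break
--             ok &= l[i - k] == l[i + k + 1]
--         ret += ok * (i + 1)
--
--     return ret
-- ===== SOURCE B (Python) =====
-- def solve_dim(l):
--     # Single left-to-right sweep: maintain the list of still-alive mirror
--     # candidates (centers p, mirror between rows p-1 and p), checking each new
--     # row j against its partner l[2*p-1-j]; a candidate whose window closes at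
--     # j = 2*p-1 is a left-edge mirror and is counted then; candidates still
--     # alive after the sweep touch the right edge and are summed at the end.
--     n = len(l)
--     alive = []
--     total = 0
--     for j in range(1, n):
--         alive.append(j)
--         alive = [p for p in alive if l[2 * p - 1 - j] == l[j]]
--         if j % 2 == 1 and alive and 2 * alive[0] == j + 1:
--             total += alive[0]
--             alive = alive[1:]
--     return total + sum(alive)
-- ===== Notes on version B (the rewrite author's own statement) =====
-- stated objective: alternative
-- what changed: B replaces A's per-center inner expansion loops by a single left-to-right sweep that maintains a list of still-alive mirror candidates, filters it against each newly seen row, counts a candidate the moment its left window closes, and sums the surviving (right-edge) candidates after the sweep.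
import Mathlib
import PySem

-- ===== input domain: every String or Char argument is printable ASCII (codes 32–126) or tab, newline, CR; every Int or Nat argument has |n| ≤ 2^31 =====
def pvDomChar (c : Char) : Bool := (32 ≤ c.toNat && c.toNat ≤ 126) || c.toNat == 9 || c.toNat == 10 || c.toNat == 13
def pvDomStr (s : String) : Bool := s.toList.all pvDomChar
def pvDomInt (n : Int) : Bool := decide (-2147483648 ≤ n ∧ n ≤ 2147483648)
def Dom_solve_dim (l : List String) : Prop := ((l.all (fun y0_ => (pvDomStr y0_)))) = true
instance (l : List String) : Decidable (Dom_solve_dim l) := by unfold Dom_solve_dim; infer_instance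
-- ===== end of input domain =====

-- B replaces A's per-center expansion loops by one left-to-right sweep that keeps a list of
-- still-alive mirror candidates, filtered against each new row (objective: alternative algorithm).

-- ===== PORT A =====
-- inner 'for k in range(i+1)' loop with its break and the ok flag
def solveDimInner (l : List String) (n i : Int) : List Int → Bool → Bool
  | [], ok => ok
  | k :: ks, ok =>
    if !ok || (i + k + 1 == n) then ok
    else solveDimInner l n i ks (ok && (PySem.List.pyGet? l (i - k) == PySem.List.pyGet? l (i + k + 1)))

def solve_dim (l : List String) : Int :=
  (PySem.List.pyRange 0 ((l.length : Int) - 1) 1).foldl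
    (fun ret i =>
      ret + (if solveDimInner l (l.length : Int) i (PySem.List.pyRange 0 (i + 1) 1) true
             then (1 : Int) else 0) * (i + 1))
    0

-- ===== PORT B =====
-- the comprehension's condition 'l[2*p-1-j] == l[j]'
def chk (l : List String) (p j : Int) : Bool :=
  PySem.List.pyGet? l (2 * p - 1 - j) == PySem.List.pyGet? l j

-- one iteration of B's sweep: append candidate j, filter the alive list against row j,
-- and on odd j close (count and drop) the candidate whose window ends here, if it survived
def altStep (l : List String) (st : List Int × Int) (j : Int) : List Int × Int :=
  let alive := (st.1 ++ [j]).filter (fun p => chk l p j)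
  if PySem.Int.mod j 2 == 1 then
    match alive with
    | p :: rest => if 2 * p == j + 1 then (rest, st.2 + p) else (p :: rest, st.2)
    | [] => ([], st.2)
  else (alive, st.2)

def solve_dim_alt (l : List String) : Int :=
  let st := (PySem.List.pyRange 1 (l.length : Int) 1).foldl (altStep l) ([], 0)
  st.2 + st.1.sum

-- ===== PRECONDITION & SPEC =====
def Spec_solve_dim (l : List String) (out : Int) : Prop := out = solve_dim_alt l
instance (l : List String) (out : Int) : Decidable (Spec_solve_dim l out) := by unfold Spec_solve_dim; infer_instance

-- ===== CLAIM (what is proved, stated in full; the proofs are below) =====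
def Claim_equal_solve_dim : Prop := ∀ (l : List String), Dom_solve_dim l → Spec_solve_dim l (solve_dim l)

-- ===== LEMMAS AND PROOFS =====

-- partial-good: candidate p has passed all its checks for rows p..j
def PG (l : List String) (j p : Int) : Bool :=
  (PySem.List.pyRange p (j + 1) 1).all (fun t => chk l p t)

-- closed forms for B's state after processing rows 1..j
def aliveL (l : List String) (j : Int) : List Int :=
  (PySem.List.pyRange 1 (j + 1) 1).filter (fun p => decide (j + 2 ≤ 2 * p) && PG l j p)

def totalT (l : List String) (j : Int) : Int :=
  ((PySem.List.pyRange 1 (j + 1) 1).map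
    (fun p => if decide (2 * p ≤ j + 1) && PG l (2 * p - 1) p then p else 0)).sum

lemma PG_iff (l : List String) (j p : Int) :
    PG l j p = true ↔ ∀ t : Int, p ≤ t → t ≤ j → PySem.List.pyGet? l (2 * p - 1 - t) = PySem.List.pyGet? l t := by
  unfold PG
  rw [List.all_eq_true]
  constructor
  · intro h t h1 h2
    have := h t (PySem.List.mem_pyRange_one.2 ⟨h1, by omega⟩)
    simpa [chk] using this
  · intro h t ht
    have := PySem.List.mem_pyRange_one.1 ht
    simpa [chk] using h t this.1 (by omega)

lemma sum_filter_eq (q : Int → Bool) (xs : List Int) :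
    (xs.filter q).sum = (xs.map (fun x => if q x then x else 0)).sum := by
  induction xs with
  | nil => rfl
  | cons x xs ih =>
    by_cases h : q x = true <;> simp [h, ih]

lemma sum_single (a b c : Int) (v : Int → Int) (g : Int → Bool)
    (h1 : a ≤ c) (h2 : c < b)
    (hg : ∀ p, a ≤ p → p < b → g p = true → p = c) :
    ((PySem.List.pyRange a b 1).map (fun p => if g p then v p else 0)).sum = (if g c then v c else 0) := by
  rw [PySem.List.pyRange_one_append a c b h1 (by omega),
    PySem.List.pyRange_one_cons h2, List.map_append, List.sum_append, List.map_cons,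
    List.sum_cons]
  have z1 : ((PySem.List.pyRange a c 1).map (fun p => if g p then v p else 0)).sum = 0 := by
    apply List.sum_eq_zero
    intro x hx
    obtain ⟨p, hp, rfl⟩ := List.mem_map.1 hx
    have hb := PySem.List.mem_pyRange_one.1 hp
    rw [if_neg]
    intro hgp
    have := hg p hb.1 (by omega) hgp
    omega
  have z2 : ((PySem.List.pyRange (c + 1) b 1).map (fun p => if g p then v p else 0)).sum = 0 := by
    apply List.sum_eq_zero
    intro x hx
    obtain ⟨p, hp, rfl⟩ := List.mem_map.1 hx
    have hb := PySem.List.mem_pyRange_one.1 hp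
    rw [if_neg]
    intro hgp
    have := hg p (by omega) hb.2 hgp
    omega
  rw [z1, z2]
  ring

lemma PG_split (l : List String) (j p : Int) (hp : p ≤ j) :
    PG l j p = (PG l (j - 1) p && chk l p j) := by
  unfold PG
  have h1 : j + 1 = j + 1 := rfl
  rw [show j - 1 + 1 = j by omega, PySem.List.pyRange_one_succ_right hp, List.all_append]
  simp

lemma mid_step (l : List String) (j : Int) (hj : 1 ≤ j) :
    (aliveL l (j - 1) ++ [j]).filter (fun p => chk l p j) =
      (PySem.List.pyRange 1 (j + 1) 1).filter (fun p => decide (j + 1 ≤ 2 * p) && PG l j p) := by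
  rw [List.filter_append, PySem.List.pyRange_one_succ_right hj, List.filter_append]
  have hsingle : [j].filter (fun p => chk l p j) =
      [j].filter (fun p => decide (j + 1 ≤ 2 * p) && PG l j p) := by
    have hPGj : PG l j j = chk l j j := by
      unfold PG
      rw [PySem.List.pyRange_one_singleton]
      simp
    simp only [List.filter_singleton, hPGj]
    rw [show decide (j + 1 ≤ 2 * j) = true from decide_eq_true (by omega)]
    simp
  rw [hsingle]
  congr 1
  unfold aliveL
  rw [show j - 1 + 1 = j by omega, List.filter_filter]
  apply List.filter_congr
  intro p hp
  have hb := PySem.List.mem_pyRange_one.1 hp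
  rw [show j - 1 + 2 = j + 1 by omega, PG_split l j p (by omega)]
  cases chk l p j <;> cases PG l (j - 1) p <;> simp

lemma mid_even (l : List String) (j : Int) (hj : 1 ≤ j) (he : j % 2 = 0) :
    (PySem.List.pyRange 1 (j + 1) 1).filter (fun p => decide (j + 1 ≤ 2 * p) && PG l j p) = aliveL l j := by
  unfold aliveL
  apply List.filter_congr
  intro p hp
  have hb := PySem.List.mem_pyRange_one.1 hp
  have : (j + 1 ≤ 2 * p) ↔ (j + 2 ≤ 2 * p) := by omega
  rw [decide_eq_decide.2 this]

lemma mid_odd (l : List String) (j p0 : Int) (h0 : 1 ≤ p0) (he : 2 * p0 = j + 1) :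
    (PySem.List.pyRange 1 (j + 1) 1).filter (fun p => decide (j + 1 ≤ 2 * p) && PG l j p) =
      (if PG l j p0 then [p0] else []) ++ aliveL l j := by
  have hp0j : p0 ≤ j := by omega
  have hsplit : PySem.List.pyRange 1 (j + 1) 1 =
      PySem.List.pyRange 1 p0 1 ++ (p0 :: PySem.List.pyRange (p0 + 1) (j + 1) 1) := by
    have e1 : PySem.List.pyRange p0 (j + 1) 1 = p0 :: PySem.List.pyRange (p0 + 1) (j + 1) 1 :=
      PySem.List.pyRange_one_cons (by omega)
    rw [PySem.List.pyRange_one_append 1 p0 (j + 1) h0 (by omega), e1]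
  have hlow1 : (PySem.List.pyRange 1 p0 1).filter (fun p => decide (j + 1 ≤ 2 * p) && PG l j p) = [] := by
    rw [List.filter_eq_nil_iff]
    intro p hp
    have hb := PySem.List.mem_pyRange_one.1 hp
    simp only [Bool.and_eq_true, decide_eq_true_eq, not_and]
    intro h; omega
  have hlow2 : (PySem.List.pyRange 1 p0 1).filter (fun p => decide (j + 2 ≤ 2 * p) && PG l j p) = [] := by
    rw [List.filter_eq_nil_iff]
    intro p hp
    have hb := PySem.List.mem_pyRange_one.1 hp
    simp only [Bool.and_eq_true, decide_eq_true_eq, not_and]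
    intro h; omega
  have htail : (PySem.List.pyRange (p0 + 1) (j + 1) 1).filter (fun p => decide (j + 1 ≤ 2 * p) && PG l j p) =
      (PySem.List.pyRange (p0 + 1) (j + 1) 1).filter (fun p => decide (j + 2 ≤ 2 * p) && PG l j p) := by
    apply List.filter_congr
    intro p hp
    have hb := PySem.List.mem_pyRange_one.1 hp
    rw [decide_eq_decide.2 (show (j + 1 ≤ 2 * p) ↔ (j + 2 ≤ 2 * p) by omega)]
  have haliveL : aliveL l j = (PySem.List.pyRange (p0 + 1) (j + 1) 1).filter (fun p => decide (j + 2 ≤ 2 * p) && PG l j p) := by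
    unfold aliveL
    rw [hsplit, List.filter_append, hlow2, List.filter_cons]
    rw [if_neg (by simp only [Bool.and_eq_true, decide_eq_true_eq]; intro h; omega)]
    simp
  rw [hsplit, List.filter_append, hlow1, List.filter_cons, haliveL, htail]
  by_cases hPG : PG l j p0 = true
  · rw [if_pos (by rw [show decide (j + 1 ≤ 2 * p0) = true from decide_eq_true (by omega)]; simp [hPG])]
    simp [hPG]
  · have hPG' : PG l j p0 = false := by simpa using hPG
    rw [if_neg (by simp [hPG'])]
    simp [hPG']

lemma total_even (l : List String) (j : Int) (hj : 1 ≤ j) (he : j % 2 = 0) :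
    totalT l j = totalT l (j - 1) := by
  unfold totalT
  simp only [show j - 1 + 1 = j from by omega]
  rw [PySem.List.pyRange_one_succ_right hj, List.map_append, List.sum_append]
  have hlast : ([j].map (fun p => if decide (2 * p ≤ j + 1) && PG l (2 * p - 1) p then p else 0)).sum = 0 := by
    simp only [List.map_cons, List.map_nil, List.sum_cons, List.sum_nil]
    rw [show decide (2 * j ≤ j + 1) = false from decide_eq_false (by omega)]
    simp
  rw [hlast, add_zero]
  congr 1
  apply List.map_congr_left
  intro p hp
  have hb := PySem.List.mem_pyRange_one.1 hp
  rw [decide_eq_decide.2 (show (2 * p ≤ j + 1) ↔ (2 * p ≤ j) by omega)]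

lemma total_odd (l : List String) (j p0 : Int) (h0 : 1 ≤ p0) (he : 2 * p0 = j + 1) :
    totalT l j = totalT l (j - 1) + (if PG l j p0 then p0 else 0) := by
  have hj : 1 ≤ j := by omega
  unfold totalT
  simp only [show j - 1 + 1 = j from by omega]
  rw [PySem.List.pyRange_one_succ_right hj, List.map_append, List.sum_append]
  by_cases h1 : p0 = 1 ∧ j = 1
  · obtain ⟨hp1, hj1⟩ := h1
    subst hp1 hj1
    rw [show PySem.List.pyRange 1 1 1 = [] from PySem.List.pyRange_one_eq_nil le_rfl]
    simp only [List.map_nil, List.sum_nil, List.map_cons, List.sum_cons, zero_add]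
    rw [show decide (2 * 1 ≤ (1 : Int) + 1) = true from decide_eq_true (by omega)]
    rw [show (2 * 1 - 1 : Int) = 1 by omega]
    by_cases hPG : PG l 1 1 = true <;> simp [hPG]
  · have hp0_2 : 2 ≤ p0 := by
      rcases Int.lt_or_le p0 2 with h | h
      · exfalso; exact h1 ⟨by omega, by omega⟩
      · exact h
    have hlast : ([j].map (fun p => if decide (2 * p ≤ j + 1) && PG l (2 * p - 1) p then p else 0)).sum = 0 := by
      simp only [List.map_cons, List.map_nil, List.sum_cons, List.sum_nil]
      rw [show decide (2 * j ≤ j + 1) = false from decide_eq_false (by omega)]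
      simp
    rw [hlast, add_zero]
    have hpt : ∀ p ∈ PySem.List.pyRange 1 j 1,
        (if decide (2 * p ≤ j + 1) && PG l (2 * p - 1) p then p else (0 : Int)) =
        (if decide (2 * p ≤ j) && PG l (2 * p - 1) p then p else 0) +
        (if decide (2 * p = j + 1) && PG l (2 * p - 1) p then p else 0) := by
      intro p hp
      have hb := PySem.List.mem_pyRange_one.1 hp
      rcases Int.lt_or_le (2 * p) (j + 1) with hc | hc
      · rw [show decide (2 * p ≤ j + 1) = true from decide_eq_true (by omega),
          show decide (2 * p ≤ j) = true from decide_eq_true (by omega),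
          show decide (2 * p = j + 1) = false from decide_eq_false (by omega)]
        simp
      · rcases Int.lt_or_le (j + 1) (2 * p) with hc2 | hc2
        · rw [show decide (2 * p ≤ j + 1) = false from decide_eq_false (by omega),
            show decide (2 * p ≤ j) = false from decide_eq_false (by omega),
            show decide (2 * p = j + 1) = false from decide_eq_false (by omega)]
          simp
        · have he2 : 2 * p = j + 1 := by omega
          rw [show decide (2 * p ≤ j + 1) = true from decide_eq_true (by omega),
            show decide (2 * p ≤ j) = false from decide_eq_false (by omega),
            show decide (2 * p = j + 1) = true from decide_eq_true (by omega)]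
          simp
    rw [List.map_congr_left hpt]
    rw [List.sum_map_add]
    congr 1
    have hs := sum_single 1 j p0 (fun p => p)
      (fun p => decide (2 * p = j + 1) && PG l (2 * p - 1) p) h0 (by omega)
      (by
        intro p _ _ hg
        simp only [Bool.and_eq_true, decide_eq_true_eq] at hg
        omega)
    simpa [show (2 : Int) * p0 - 1 = j from by omega,
      show decide (2 * p0 = j + 1) = true from decide_eq_true (by omega)] using hs

lemma alt_inv (l : List String) : ∀ (fuel : Nat) (j : Int), j.toNat = fuel → 0 ≤ j →
    (PySem.List.pyRange 1 (j + 1) 1).foldl (altStep l) ([], 0) = (aliveL l j, totalT l j) := by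
  intro fuel
  induction fuel using Nat.strong_induction_on with
  | _ fuel ih =>
    intro j hf h0
    by_cases hj : 1 ≤ j
    · have hpre := ih (j - 1).toNat (by omega) (j - 1) rfl (by omega)
      simp only [show j - 1 + 1 = j from by omega] at hpre
      rw [PySem.List.pyRange_one_succ_right hj, List.foldl_append, hpre, List.foldl_cons,
        List.foldl_nil]
      have hmod : PySem.Int.mod j 2 = j % 2 := PySem.Int.mod_eq_emod_of_pos (by omega)
      simp only [altStep, mid_step l j hj, hmod]
      rcases Int.emod_two_eq j with hpar | hpar
      · rw [hpar]
        simp only [show ((0 : Int) == 1) = false from rfl, Bool.false_eq_true, if_false]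
        rw [mid_even l j hj hpar, total_even l j hj hpar]
      · rw [hpar]
        simp only [show ((1 : Int) == 1) = true from rfl, if_true]
        have hp0 : 2 * ((j + 1) / 2) = j + 1 := by omega
        have h0p : 1 ≤ (j + 1) / 2 := by omega
        rw [mid_odd l j ((j + 1) / 2) h0p hp0, total_odd l j ((j + 1) / 2) h0p hp0]
        by_cases hPG : PG l j ((j + 1) / 2) = true
        · rw [if_pos hPG, if_pos hPG]
          simp only [List.cons_append, List.nil_append]
          rw [show ((2 * ((j + 1) / 2) == j + 1)) = true from beq_iff_eq.2 hp0]
          simp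
        · have hPG' : PG l j ((j + 1) / 2) = false := by simpa using hPG
          rw [if_neg (by simp [hPG']), if_neg (by simp [hPG'])]
          simp only [List.nil_append, add_zero]
          cases hA : aliveL l j with
          | nil => simp
          | cons h t =>
            have hh : h ∈ aliveL l j := by rw [hA]; exact List.mem_cons_self
            have hhge : j + 2 ≤ 2 * h := by
              unfold aliveL at hh
              have := List.of_mem_filter hh
              simp only [Bool.and_eq_true, decide_eq_true_eq] at this
              exact this.1
            simp [show ((2 * h == j + 1)) = false from beq_eq_false_iff_ne.2 (by omega)]
    · have hj0 : j = 0 := by omega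
      subst hj0
      rw [show PySem.List.pyRange 1 (0 + 1) 1 = [] from PySem.List.pyRange_one_eq_nil (by omega)]
      unfold aliveL totalT
      rw [show PySem.List.pyRange 1 (0 + 1) 1 = [] from PySem.List.pyRange_one_eq_nil (by omega)]
      simp

lemma innerA_false (l : List String) (n i : Int) (ks : List Int) :
    solveDimInner l n i ks false = false := by
  cases ks <;> simp [solveDimInner]

lemma innerA_iff (l : List String) (n i : Int) (hn : n = (l.length : Int)) :
    ∀ (dfuel : Nat) (j : Int), (i + 1 - j).toNat = dfuel → 0 ≤ j → i + j + 1 ≤ n →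
    (solveDimInner l n i (PySem.List.pyRange j (i + 1) 1) true = true ↔
      ∀ k : Int, j ≤ k → k < i + 1 → i + k + 1 < n →
        PySem.List.pyGet? l (i - k) = PySem.List.pyGet? l (i + k + 1)) := by
  intro dfuel
  induction dfuel using Nat.strong_induction_on with
  | _ dfuel ih =>
    intro j hj h0 hjn
    by_cases hlt : j < i + 1
    · rw [PySem.List.pyRange_one_cons hlt]
      by_cases hbreak : i + j + 1 = n
      · have e : solveDimInner l n i (j :: PySem.List.pyRange (j + 1) (i + 1) 1) true = true := by
          simp [solveDimInner, hbreak]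
        rw [e]
        constructor
        · intro _ k hk1 hk2 hk3
          exact absurd hk3 (by omega)
        · intro _; rfl
      · have hlt2 : i + j + 1 < n := lt_of_le_of_ne hjn hbreak
        have e : solveDimInner l n i (j :: PySem.List.pyRange (j + 1) (i + 1) 1) true =
            solveDimInner l n i (PySem.List.pyRange (j + 1) (i + 1) 1)
              (PySem.List.pyGet? l (i - j) == PySem.List.pyGet? l (i + j + 1)) := by
          simp [solveDimInner, hbreak]
        rw [e]
        by_cases heq : PySem.List.pyGet? l (i - j) = PySem.List.pyGet? l (i + j + 1)
        · have hb : (PySem.List.pyGet? l (i - j) == PySem.List.pyGet? l (i + j + 1)) = true := by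
            simpa using heq
          rw [hb, ih ((i + 1 - (j + 1)).toNat) (by omega) (j + 1) rfl (by omega) (by omega)]
          constructor
          · intro h k hk1 hk2 hk3
            rcases eq_or_lt_of_le hk1 with rfl | hlt3
            · exact heq
            · exact h k (by omega) hk2 hk3
          · intro h k hk1 hk2 hk3
            exact h k (by omega) hk2 hk3
        · have hb : (PySem.List.pyGet? l (i - j) == PySem.List.pyGet? l (i + j + 1)) = false := by
            simpa using heq
          rw [hb, innerA_false]
          constructor
          · intro h; exact absurd h (by simp)
          · intro h; exact absurd (h j le_rfl hlt hlt2) heq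
    · rw [PySem.List.pyRange_one_eq_nil (by omega)]
      constructor
      · intro _ k hk1 hk2 hk3
        exact absurd hk2 (by omega)
      · intro _; rfl

-- ===== VERDICT (by name: the statement is the Claim_ definition above) =====
lemma pointwise_eq (l : List String) (k : Nat) (hk : (k : Int) < (l.length : Int) - 1) :
    (if solveDimInner l (l.length : Int) (k : Int)
        (PySem.List.pyRange 0 ((k : Int) + 1) 1) true then (1 : Int) else 0) * ((k : Int) + 1) =
    (if decide (2 * (1 + (k : Int)) ≤ (l.length : Int)) && PG l (2 * (1 + (k : Int)) - 1) (1 + (k : Int))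
        then (1 + (k : Int)) else 0) +
    (if decide ((l.length : Int) + 1 ≤ 2 * (1 + (k : Int))) && PG l ((l.length : Int) - 1) (1 + (k : Int))
        then (1 + (k : Int)) else 0) := by
  set n : Int := (l.length : Int) with hn
  set i : Int := (k : Int) with hi
  set p : Int := 1 + (k : Int) with hp
  have hp1 : p = i + 1 := by omega
  have hi0 : 0 ≤ i := by omega
  have hA := innerA_iff l n i hn (i + 1 - 0).toNat 0 rfl le_rfl (by omega)
  rcases Int.lt_or_le n (2 * p) with hc | hc
  · -- right-touching candidate: n + 1 ≤ 2p
    rw [show decide (2 * p ≤ n) = false from decide_eq_false (by omega),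
      show decide (n + 1 ≤ 2 * p) = true from decide_eq_true (by omega)]
    simp only [Bool.false_and, Bool.true_and, Bool.false_eq_true, if_false, zero_add]
    have hiff : (solveDimInner l n i (PySem.List.pyRange 0 (i + 1) 1) true = true)
        ↔ PG l (n - 1) p = true := by
      rw [hA, PG_iff]
      constructor
      · intro h t ht1 ht2
        have := h (t - p) (by omega) (by omega) (by omega)
        rw [show i - (t - p) = 2 * p - 1 - t by omega,
          show i + (t - p) + 1 = t by omega] at this
        exact this
      · intro h k' h1 h2 h3
        have := h (p + k') (by omega) (by omega)
        rw [show 2 * p - 1 - (p + k') = i - k' by omega] at this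
        rw [show i + k' + 1 = p + k' by omega]
        exact this
    rw [show solveDimInner l n i (PySem.List.pyRange 0 (i + 1) 1) true = PG l (n - 1) p from
      Bool.eq_iff_iff.2 (by rw [hiff])]
    by_cases hPG : PG l (n - 1) p = true
    · rw [if_pos hPG, if_pos hPG]; omega
    · have h' : PG l (n - 1) p = false := by simpa using hPG
      rw [h']; simp
  · -- left-touching candidate: 2p ≤ n
    rw [show decide (2 * p ≤ n) = true from decide_eq_true (by omega),
      show decide (n + 1 ≤ 2 * p) = false from decide_eq_false (by omega)]
    simp only [Bool.false_and, Bool.true_and, Bool.false_eq_true, if_false, add_zero]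
    have hiff : (solveDimInner l n i (PySem.List.pyRange 0 (i + 1) 1) true = true)
        ↔ PG l (2 * p - 1) p = true := by
      rw [hA, PG_iff]
      constructor
      · intro h t ht1 ht2
        have := h (t - p) (by omega) (by omega) (by omega)
        rw [show i - (t - p) = 2 * p - 1 - t by omega,
          show i + (t - p) + 1 = t by omega] at this
        exact this
      · intro h k' h1 h2 h3
        have := h (p + k') (by omega) (by omega)
        rw [show 2 * p - 1 - (p + k') = i - k' by omega] at this
        rw [show i + k' + 1 = p + k' by omega]
        exact this
    rw [show solveDimInner l n i (PySem.List.pyRange 0 (i + 1) 1) true = PG l (2 * p - 1) p from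
      Bool.eq_iff_iff.2 (by rw [hiff])]
    by_cases hPG : PG l (2 * p - 1) p = true
    · rw [if_pos hPG, if_pos hPG]; omega
    · have h' : PG l (2 * p - 1) p = false := by simpa using hPG
      rw [h']; simp

-- ===== VERDICT (by name: the statement is the Claim_ definition above) =====
theorem solve_dim_spec : Claim_equal_solve_dim := by
  intro l _
  unfold Spec_solve_dim solve_dim solve_dim_alt
  by_cases hn1 : (l.length : Int) ≤ 1
  · rw [PySem.List.pyRange_one_eq_nil (show (l.length : Int) - 1 ≤ 0 by omega),
      PySem.List.pyRange_one_eq_nil hn1]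
    simp
  · have hinv := alt_inv l ((l.length : Int) - 1).toNat ((l.length : Int) - 1) rfl (by omega)
    simp only [show (l.length : Int) - 1 + 1 = (l.length : Int) from by omega] at hinv
    rw [hinv]
    rw [PySem.List.foldl_add (PySem.List.pyRange 0 ((l.length : Int) - 1) 1)
      (fun i => (if solveDimInner l (l.length : Int) i (PySem.List.pyRange 0 (i + 1) 1) true
                 then (1 : Int) else 0) * (i + 1)) 0]
    unfold aliveL totalT
    simp only [show (l.length : Int) - 1 + 1 = (l.length : Int) from by omega,
      show (l.length : Int) - 1 + 2 = (l.length : Int) + 1 from by omega]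
    rw [sum_filter_eq]
    rw [← List.sum_map_add]
    rw [PySem.List.pyRange_one 0 ((l.length : Int) - 1), PySem.List.pyRange_one 1 (l.length : Int)]
    simp only [sub_zero, List.map_map]
    rw [zero_add]
    congr 1
    apply List.map_congr_left
    intro k hk
    have hk' : (k : Int) < (l.length : Int) - 1 := by
      have := List.mem_range.1 hk
      omega
    simpa using pointwise_eq l k hk'
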